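-- pv_equiv track=rewrite | github.com/HeluTB/Programming | leetcode/find-target-indices-after-sorting-array_trial1.py | targetIndices
-- ===== SOURCE A (Python) =====
-- from typing import List
--
-- def targetIndices(nums: List[int], target: int) -> List[int]:
--     smaller_count = 0
--     count = 0
--
--     for num in nums:
--         if num < target:
--             smaller_count += 1
--         elif num == target:
--             count += 1
--
--     result = []
--     for i in range(count):
--         result.append(smaller_count + i)
--
--     return result
-- ===== SOURCE B (Python) =====
-- from typing import List
--
-- def targetIndices(nums: List[int], target: int) -> List[int]:
--     arr = sorted(nums)
--     return [i for i, x in enumerate(arr) if x == target]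
-- ===== Notes on version B (the rewrite author's own statement) =====
-- stated objective: simpler
-- what changed: B sorts a copy of the list and reads the target's indices directly off the sorted array with enumerate, instead of counting smaller/equal elements and synthesizing the index range arithmetically.
import Mathlib
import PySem

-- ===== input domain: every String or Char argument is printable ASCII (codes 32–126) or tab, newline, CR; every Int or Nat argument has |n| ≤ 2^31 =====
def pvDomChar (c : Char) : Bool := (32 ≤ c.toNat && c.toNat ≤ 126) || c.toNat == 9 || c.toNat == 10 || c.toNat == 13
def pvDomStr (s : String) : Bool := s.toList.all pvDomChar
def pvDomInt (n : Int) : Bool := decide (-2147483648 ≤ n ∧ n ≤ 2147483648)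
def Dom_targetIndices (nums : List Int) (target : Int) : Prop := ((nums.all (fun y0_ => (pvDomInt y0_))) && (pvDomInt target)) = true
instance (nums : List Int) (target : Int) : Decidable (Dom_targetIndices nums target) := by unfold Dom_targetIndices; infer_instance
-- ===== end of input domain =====

-- B sorts a copy of the list and reads the target's indices off it with enumerate,
-- instead of A's counting of smaller/equal elements; objective: simpler.

-- ===== PORT A =====
def targetIndices (nums : List Int) (target : Int) : List Int :=
  let counts : Int × Int :=
    nums.foldl
      (fun st num =>
        if num < target then (st.1 + 1, st.2)
        else if num = target then (st.1, st.2 + 1)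
        else st)
      (0, 0)
  (PySem.List.pyRange 0 counts.2 1).foldl (fun result i => result ++ [counts.1 + i]) []

-- ===== PORT B =====
def targetIndices_alt (nums : List Int) (target : Int) : List Int :=
  ((PySem.List.enumerate (PySem.List.sorted nums (fun x => x) false) 0).filter
      (fun p => p.2 == target)).map (fun p => p.1)

-- ===== PRECONDITION & SPEC =====
def Spec_targetIndices (nums : List Int) (target : Int) (out : List Int) : Prop := out = targetIndices_alt nums target
instance (nums : List Int) (target : Int) (out : List Int) : Decidable (Spec_targetIndices nums target out) := by unfold Spec_targetIndices; infer_instance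

-- ===== CLAIM (what is proved, stated in full; the proofs are below) =====
def Claim_equal_targetIndices : Prop := ∀ (nums : List Int) (target : Int), Dom_targetIndices nums target → Spec_targetIndices nums target (targetIndices nums target)

-- ===== LEMMAS AND PROOFS =====

/-- A's first loop computes (offset + count of smaller, offset + count of equal). -/
lemma foldA_counts (t : Int) : ∀ (xs : List Int) (a b : Int),
    xs.foldl
      (fun st num =>
        if num < t then (st.1 + 1, st.2)
        else if num = t then (st.1, st.2 + 1)
        else st)
      (a, b)
    = (a + (xs.countP (fun x => decide (x < t)) : Int), b + (xs.count t : Int)) := by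
  intro xs
  induction xs with
  | nil => intro a b; simp
  | cons x xs ih =>
    intro a b
    by_cases h1 : x < t
    · have hne : ¬ x = t := by omega
      simp only [List.foldl_cons, if_pos h1, ih, List.countP_cons, List.count_cons]
      refine Prod.ext ?_ ?_ <;> simp [h1, hne] <;> push_cast <;> ring
    · by_cases h2 : x = t
      · simp only [List.foldl_cons, if_neg h1, if_pos h2, ih, List.countP_cons, List.count_cons]
        refine Prod.ext ?_ ?_ <;> simp [h1, h2] <;> push_cast <;> ring
      · simp only [List.foldl_cons, if_neg h1, if_neg h2, ih, List.countP_cons, List.count_cons]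
        refine Prod.ext ?_ ?_ <;> simp [h1, h2]

/-- A's second loop is append-of-singletons, i.e. a map. -/
lemma foldA_build (s : Int) : ∀ (L : List Int) (acc : List Int),
    L.foldl (fun result i => result ++ [s + i]) acc = acc ++ L.map (fun i => s + i) := by
  intro L
  induction L with
  | nil => intro acc; simp
  | cons x xs ih => intro acc; simp [List.foldl_cons, ih]

/-- On a sorted list, the enumerate-filter comprehension yields the contiguous index range. -/
lemma filt_sorted (t : Int) : ∀ (l : List Int) (s : Int), l.Pairwise (· ≤ ·) →
    ((PySem.List.enumerate l s).filter (fun p => p.2 == t)).map (fun p => p.1)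
      = (List.range (l.count t)).map (fun (k : Nat) => s + (l.countP (fun x => decide (x < t)) : Int) + (k : Int)) := by
  intro l
  induction l with
  | nil => intro s _; simp [PySem.List.enumerate_nil]
  | cons x xs ih =>
    intro s hp
    have hx : ∀ y ∈ xs, x ≤ y := by
      intro y hy; exact (List.pairwise_cons.mp hp).1 y hy
    have hpt : xs.Pairwise (· ≤ ·) := (List.pairwise_cons.mp hp).2
    rw [PySem.List.enumerate_cons]
    by_cases h2 : x = t
    · subst h2
      have h1 : ¬ x < x := lt_irrefl x
      rw [List.filter_cons_of_pos (by simp), List.map_cons, ih (s + 1) hpt]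
      have hc0 : xs.countP (fun y => decide (y < x)) = 0 := by
        apply List.countP_eq_zero.mpr
        intro y hy; simpa using not_lt.mpr (hx y hy)
      rw [List.count_cons_self, List.countP_cons]
      simp only [h1, decide_false, if_false, hc0]
      rw [List.range_succ_eq_map, List.map_cons, List.map_map]
      refine congrArg₂ _ (by push_cast; ring) ?_
      refine List.map_congr_left fun k _ => ?_
      simp only [Function.comp]
      push_cast; ring
    · have hne : (x == t) = false := by simpa using h2
      rw [List.filter_cons_of_neg (by simp [hne]), ih (s + 1) hpt]
      rw [List.count_cons_of_ne (by omega), List.countP_cons]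
      by_cases h1 : x < t
      · simp only [h1, decide_true, if_true]
        refine List.map_congr_left fun k _ => ?_
        push_cast; ring
      · -- x > t: nothing in the tail matches either
        have hgt : t < x := by omega
        have hcnt : xs.count t = 0 := by
          apply List.count_eq_zero.mpr
          intro hmem
          exact absurd (hx t hmem) (by omega)
        simp [hcnt]

-- ===== VERDICT (by name: the statement is the Claim_ definition above) =====
theorem targetIndices_spec : Claim_equal_targetIndices := by
  intro nums t _
  unfold Spec_targetIndices targetIndices targetIndices_alt
  have hperm : (PySem.List.sorted nums (fun x => x) false).Perm nums :=
    PySem.List.sorted_perm nums (fun x => x) false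
  have hpw : (PySem.List.sorted nums (fun x => x) false).Pairwise (· ≤ ·) := by
    have := PySem.List.sorted_pairwise nums (fun x => x)
    simpa using this
  rw [filt_sorted t _ 0 hpw, hperm.count_eq, hperm.countP_eq]
  rw [foldA_counts, foldA_build, PySem.List.pyRange_one]
  have hn : ((0 + (nums.count t : Int)) - 0).toNat = nums.count t := by omega
  rw [hn, List.map_map, List.nil_append]
  refine List.map_congr_left fun k _ => ?_
  simp only [Function.comp]
  push_cast; ring
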